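-- pv_equiv track=rewrite | github.com/RivkiAuerbach/Python-Project | pythonProject1/main.py | task10_calculate_profit
-- ===== SOURCE A (Python) =====
-- def task10_calculate_profit(customers_list):
--     total_profit = 0
--     group_size = 8
--     additional_payment = 50
--
--     # Iterate over the customers list
--     for i, customer in enumerate(customers_list):
--         # Check if the customer index is divisible by 8 without remainder
--         if (i + 1) % group_size == 0:
--             total_profit += customer
--         else:
--             # Check if the current customer index is beyond the last multiple of 8
--             if (i + 1) > ((i // group_size) + 1) * group_size:
--                 total_profit += customer + additional_payment
--
--     return total_profit
-- ===== SOURCE B (Python) =====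
-- def task10_calculate_profit(customers_list):
--     # Visit only every 8th position (0-based 7, 15, 23, ...) with a strided
--     # index loop; no per-element modulo test, no dead additional-payment branch.
--     total_profit = 0
--     i = 7
--     n = len(customers_list)
--     while i < n:
--         total_profit += customers_list[i]
--         i += 8
--     return total_profit
-- ===== Notes on version B (the rewrite author's own statement) =====
-- stated objective: faster
-- what changed: B replaces A's enumerate-every-element loop with a modulo test and a dead additional-payment branch by a strided index loop that visits only indices 7, 15, 23, ... and sums them directly.
import Mathlib
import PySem

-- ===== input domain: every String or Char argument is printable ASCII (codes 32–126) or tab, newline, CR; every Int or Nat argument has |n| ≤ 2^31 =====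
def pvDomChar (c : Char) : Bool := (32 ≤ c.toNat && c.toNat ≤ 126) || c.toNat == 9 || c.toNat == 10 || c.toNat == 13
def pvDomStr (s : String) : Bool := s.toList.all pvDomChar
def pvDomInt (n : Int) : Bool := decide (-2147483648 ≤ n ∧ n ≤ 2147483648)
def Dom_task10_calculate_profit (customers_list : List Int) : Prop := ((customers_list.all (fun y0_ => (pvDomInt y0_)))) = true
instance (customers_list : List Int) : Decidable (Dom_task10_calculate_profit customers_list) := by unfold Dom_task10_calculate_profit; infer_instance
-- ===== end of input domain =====

-- B visits only every 8th index (7, 15, 23, ...) with a strided index loop instead of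
-- enumerating every element with a modulo test and a dead additional-payment branch.


-- ===== PORT A =====
-- group_size = 8 and additional_payment = 50 are inlined literals.
def task10_calculate_profit (customers_list : List Int) : Int :=
  (PySem.List.enumerate customers_list 0).foldl
    (fun total_profit p =>
      if PySem.Int.mod (p.1 + 1) 8 = 0 then total_profit + p.2
      else
        if p.1 + 1 > (PySem.Int.floordiv p.1 8 + 1) * 8 then total_profit + p.2 + 50
        else total_profit)
    0

-- ===== PORT B =====
-- The while loop of Source B; the index i is always < length when read, so getElem is exact.
def task10AltLoop (customers_list : List Int) (i : Nat) (total_profit : Int) : Int :=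
  if h : i < customers_list.length then
    task10AltLoop customers_list (i + 8) (total_profit + customers_list[i])
  else total_profit
termination_by customers_list.length - i

def task10_calculate_profit_alt (customers_list : List Int) : Int :=
  task10AltLoop customers_list 7 0

-- ===== PRECONDITION & SPEC =====
def Spec_task10_calculate_profit (customers_list : List Int) (out : Int) : Prop := out = task10_calculate_profit_alt customers_list
instance (customers_list : List Int) (out : Int) : Decidable (Spec_task10_calculate_profit customers_list out) := by unfold Spec_task10_calculate_profit; infer_instance

-- ===== CLAIM (what is proved, stated in full; the proofs are below) =====
def Claim_equal_task10_calculate_profit : Prop := ∀ (customers_list : List Int), Dom_task10_calculate_profit customers_list → Spec_task10_calculate_profit customers_list (task10_calculate_profit customers_list)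

-- ===== LEMMAS AND PROOFS =====

-- pick r xs = the elements of xs at positions ≡ r (mod 8); common value of both loops.
def pick : Nat → List Int → List Int
  | _, [] => []
  | 0, x :: t => x :: pick 7 t
  | r + 1, _ :: t => pick r t

theorem pick_eq_drop : ∀ (r : Nat) (ys : List Int), pick r ys = pick 0 (ys.drop r) := by
  intro r
  induction r with
  | zero => intro ys; simp
  | succ s ih =>
    intro ys
    cases ys with
    | nil => simp [pick]
    | cons y t => simpa [pick] using ih t

theorem altLoop_eq (xs : List Int) :
    ∀ (k i : Nat) (t : Int), xs.length - i ≤ k →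
      task10AltLoop xs i t = t + (pick 0 (xs.drop i)).sum := by
  intro k
  induction k with
  | zero =>
    intro i t hk
    rw [task10AltLoop]
    split
    · omega
    · rw [List.drop_eq_nil_of_le (by omega)]; simp [pick]
  | succ m ih =>
    intro i t hk
    rw [task10AltLoop]
    split
    · rename_i h
      rw [ih (i + 8) (t + xs[i]) (by omega)]
      rw [List.drop_eq_getElem_cons h]
      have h7 : pick 7 (xs.drop (i + 1)) = pick 0 (xs.drop (i + 8)) := by
        rw [pick_eq_drop, List.drop_drop]
      simp [pick, h7]
      ring
    · rw [List.drop_eq_nil_of_le (by omega)]; simp [pick]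

theorem foldA (xs : List Int) :
    ∀ (j r : Nat) (t : Int), (j + r) % 8 = 7 → r < 8 →
      (PySem.List.enumerate xs (j : Int)).foldl
        (fun total_profit p =>
          if PySem.Int.mod (p.1 + 1) 8 = 0 then total_profit + p.2
          else
            if p.1 + 1 > (PySem.Int.floordiv p.1 8 + 1) * 8 then total_profit + p.2 + 50
            else total_profit)
        t
      = t + (pick r xs).sum := by
  induction xs with
  | nil => intro j r t _ _; simp [PySem.List.enumerate_nil, pick]
  | cons x xs ih =>
    intro j r t hm hr
    rw [PySem.List.enumerate_cons, List.foldl_cons]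
    have hcast : (j : Int) + 1 = ((j + 1 : Nat) : Int) := by push_cast; ring
    have hmod : PySem.Int.mod ((j : Int) + 1) 8 = ((j : Int) + 1) % 8 := by
      rw [PySem.Int.mod, Int.fmod_eq_emod]; norm_num
    have hdiv : PySem.Int.floordiv (j : Int) 8 = (j : Int) / 8 := by
      rw [PySem.Int.floordiv, Int.fdiv_eq_ediv]; norm_num
    simp only [hmod, hdiv]
    cases r with
    | zero =>
      have hc : ((j : Int) + 1) % 8 = 0 := by omega
      rw [if_pos hc, hcast, ih (j + 1) 7 (t + x) (by omega) (by omega)]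
      simp [pick]; ring
    | succ s =>
      have hc : ¬ ((j : Int) + 1) % 8 = 0 := by omega
      have hc2 : ¬ ((j : Int) + 1 > ((j : Int) / 8 + 1) * 8) := by omega
      rw [if_neg hc, if_neg hc2, hcast, ih (j + 1) s t (by omega) (by omega)]
      simp [pick]

-- ===== VERDICT (by name: the statement is the Claim_ definition above) =====
theorem task10_calculate_profit_spec : Claim_equal_task10_calculate_profit := by
  intro xs _
  unfold Spec_task10_calculate_profit task10_calculate_profit task10_calculate_profit_alt
  have hA := foldA xs 0 7 0 (by norm_num) (by norm_num)
  have hB := altLoop_eq xs xs.length 7 0 (by omega)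
  simp only [Nat.cast_zero, zero_add] at hA hB
  rw [hA, hB, pick_eq_drop]
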